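-- pv_equiv track=rewrite | github.com/MounaSafir/clustering_LE4EE | src/main.py | compute_lifetime
-- ===== SOURCE A (Python) =====
-- def compute_lifetime(metrics, nb_nodes):
--     times = metrics["time"]
--     alive = metrics["alive_nodes"]
--
--     fnd = None
--     hnd = None
--     lnd = None
--
--     for t, a in zip(times, alive):
--         if fnd is None and a < nb_nodes:
--             fnd = t
--         if hnd is None and a <= nb_nodes / 2:
--             hnd = t
--         if lnd is None and a == 0:
--             lnd = t
--
--     return fnd, hnd, lnd
-- ===== SOURCE B (Python) =====
-- def compute_lifetime(metrics, nb_nodes):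
--     times = metrics["time"]
--     alive = metrics["alive_nodes"]
--     fnd = next((t for t, a in zip(times, alive) if a < nb_nodes), None)
--     hnd = next((t for t, a in zip(times, alive) if a <= nb_nodes / 2), None)
--     lnd = next((t for t, a in zip(times, alive) if a == 0), None)
--     return fnd, hnd, lnd
-- ===== Notes on version B (the rewrite author's own statement) =====
-- stated objective: idiomatic
-- what changed: The single flag-bearing loop that fills three sentinel variables is decomposed into three independent early-exiting first-match searches (next over a generator expression per metric).
import Mathlib
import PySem

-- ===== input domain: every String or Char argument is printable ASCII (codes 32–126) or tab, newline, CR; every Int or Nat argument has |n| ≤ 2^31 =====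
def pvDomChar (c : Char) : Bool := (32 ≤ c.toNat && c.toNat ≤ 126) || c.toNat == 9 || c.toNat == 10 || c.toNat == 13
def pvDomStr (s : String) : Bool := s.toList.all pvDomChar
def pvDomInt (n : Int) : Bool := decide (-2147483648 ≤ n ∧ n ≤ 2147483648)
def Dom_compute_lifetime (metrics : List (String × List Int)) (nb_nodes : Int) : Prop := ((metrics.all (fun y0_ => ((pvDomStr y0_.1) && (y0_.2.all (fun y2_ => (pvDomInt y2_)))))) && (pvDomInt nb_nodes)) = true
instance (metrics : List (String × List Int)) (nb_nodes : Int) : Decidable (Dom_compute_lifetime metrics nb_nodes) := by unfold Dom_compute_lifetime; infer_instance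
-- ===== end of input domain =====

-- B replaces A's single sentinel-filling loop by three independent first-match searches (idiomatic decomposition, same cost).


-- ===== PORT A =====
-- metrics["time"] / metrics["alive_nodes"]: first-match lookup on the assoc list (KeyError excluded by Pre_).
-- 'a <= nb_nodes / 2' is Python float division; with |ints| ≤ 2^31 it is exactly '2*a ≤ nb_nodes'.
-- the body of A's for-loop: the three sentinel updates in order
def stepA (nb_nodes : Int) (s : Option Int × Option Int × Option Int) (ta : Int × Int) :
    Option Int × Option Int × Option Int :=
  let s := if s.1 = none ∧ ta.2 < nb_nodes then (some ta.1, s.2.1, s.2.2) else s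
  let s := if s.2.1 = none ∧ 2 * ta.2 ≤ nb_nodes then (s.1, some ta.1, s.2.2) else s
  let s := if s.2.2 = none ∧ ta.2 = 0 then (s.1, s.2.1, some ta.1) else s
  s

def compute_lifetime (metrics : List (String × List Int)) (nb_nodes : Int) : Option Int × Option Int × Option Int :=
  let times := ((PySem.Dict.mk metrics).get? "time").getD []
  let alive := ((PySem.Dict.mk metrics).get? "alive_nodes").getD []
  (List.zip times alive).foldl (stepA nb_nodes) (none, none, none)

-- ===== PORT B =====
-- three independent first-match scans over zip(times, alive)
def compute_lifetime_alt (metrics : List (String × List Int)) (nb_nodes : Int) : Option Int × Option Int × Option Int :=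
  let times := ((PySem.Dict.mk metrics).get? "time").getD []
  let alive := ((PySem.Dict.mk metrics).get? "alive_nodes").getD []
  let z := List.zip times alive
  let fnd := (z.find? (fun ta => decide (ta.2 < nb_nodes))).map Prod.fst
  let hnd := (z.find? (fun ta => decide (2 * ta.2 ≤ nb_nodes))).map Prod.fst
  let lnd := (z.find? (fun ta => decide (ta.2 = 0))).map Prod.fst
  (fnd, hnd, lnd)

-- ===== PRECONDITION & SPEC =====
-- Pre_ excludes exactly the inputs where A raises KeyError: a missing "time" or "alive_nodes" key.
def Pre_compute_lifetime (metrics : List (String × List Int)) (nb_nodes : Int) : Prop :=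
  ((PySem.Dict.mk metrics).get? "time").isSome ∧ ((PySem.Dict.mk metrics).get? "alive_nodes").isSome
instance (metrics : List (String × List Int)) (nb_nodes : Int) : Decidable (Pre_compute_lifetime metrics nb_nodes) := by unfold Pre_compute_lifetime; infer_instance
def pvWitness_compute_lifetime : (List (String × List Int)) × Int := ([("time", [1, 2, 3]), ("alive_nodes", [2, 1, 0])], 2)

def Spec_compute_lifetime (metrics : List (String × List Int)) (nb_nodes : Int) (out : Option Int × Option Int × Option Int) : Prop := out = compute_lifetime_alt metrics nb_nodes
instance (metrics : List (String × List Int)) (nb_nodes : Int) (out : Option Int × Option Int × Option Int) : Decidable (Spec_compute_lifetime metrics nb_nodes out) := by unfold Spec_compute_lifetime; infer_instance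

-- ===== CLAIM (what is proved, stated in full; the proofs are below) =====
def Claim_equal_compute_lifetime : Prop := ∀ (metrics : List (String × List Int)) (nb_nodes : Int), Dom_compute_lifetime metrics nb_nodes → Pre_compute_lifetime metrics nb_nodes → Spec_compute_lifetime metrics nb_nodes (compute_lifetime metrics nb_nodes)

-- ===== LEMMAS AND PROOFS =====

-- one single-predicate sentinel fill
def fill1 (p : Int × Int → Bool) (s : Option Int) (zs : List (Int × Int)) : Option Int :=
  zs.foldl (fun s ta => if s = none ∧ p ta then some ta.1 else s) s

theorem fill1_some (p : Int × Int → Bool) (x : Int) (zs : List (Int × Int)) :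
    fill1 p (some x) zs = some x := by
  induction zs with
  | nil => rfl
  | cons h t ih => simp [fill1, List.foldl] at ih ⊢; exact ih

theorem fill1_cons (p : Int × Int → Bool) (s : Option Int) (hd : Int × Int) (t : List (Int × Int)) :
    fill1 p s (hd :: t) = fill1 p (if s = none ∧ p hd then some hd.1 else s) t := rfl

theorem fill1_none_eq_find (p : Int × Int → Bool) (zs : List (Int × Int)) :
    fill1 p none zs = (zs.find? p).map Prod.fst := by
  induction zs with
  | nil => rfl
  | cons h t ih =>
    by_cases hp : p h
    · simp [fill1_cons, hp, fill1_some, List.find?]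
    · simp [fill1_cons, hp, List.find?, ih]

-- one step of A's loop body, written componentwise
theorem step_eq (nb : Int) (s0 : Option Int × Option Int × Option Int) (ta : Int × Int) :
    stepA nb s0 ta
    = (if s0.1 = none ∧ ta.2 < nb then some ta.1 else s0.1,
       if s0.2.1 = none ∧ 2 * ta.2 ≤ nb then some ta.1 else s0.2.1,
       if s0.2.2 = none ∧ ta.2 = 0 then some ta.1 else s0.2.2) := by
  obtain ⟨f, h, l⟩ := s0
  unfold stepA
  dsimp only
  split_ifs <;> simp_all

-- A's combined fold splits into three independent fills
theorem fold_split (nb : Int) (zs : List (Int × Int)) (f h l : Option Int) :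
    zs.foldl (stepA nb) (f, h, l)
    = (fill1 (fun ta => decide (ta.2 < nb)) f zs,
       fill1 (fun ta => decide (2 * ta.2 ≤ nb)) h zs,
       fill1 (fun ta => decide (ta.2 = 0)) l zs) := by
  induction zs generalizing f h l with
  | nil => rfl
  | cons hd t ih =>
    rw [List.foldl_cons, step_eq nb (f, h, l) hd, ih]
    simp only [fill1_cons, decide_eq_true_eq]

-- ===== VERDICT (by name: the statement is the Claim_ definition above) =====
theorem compute_lifetime_spec : Claim_equal_compute_lifetime := by
  intro metrics nb_nodes _ _
  unfold Spec_compute_lifetime compute_lifetime compute_lifetime_alt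
  simp only [fold_split, fill1_none_eq_find]
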